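-- pv_equiv track=rewrite | github.com/zborrman/Shadow-Warden-AI | warden/mtls.py | _cn_from_dn
-- ===== SOURCE A (Python) =====
-- def _cn_from_dn(dn: str) -> str | None:
--     """Parse CN from an OpenSSL DN string.
--
--     Accepts both comma-separated (RFC 2253) and slash-separated (OpenSSL)
--     formats::
--
--         "CN=proxy,O=ShadowWarden,C=US"
--         "/CN=proxy/O=ShadowWarden/C=US"
--     """
--     if not dn:
--         return None
--     # Detect format by leading slash (OpenSSL) vs comma (RFC 2253)
--     if dn.startswith("/"):
--         for part in dn.split("/"):
--             part = part.strip()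
--             if part.upper().startswith("CN="):
--                 return part[3:]
--     else:
--         for part in dn.split(","):
--             part = part.strip()
--             if part.upper().startswith("CN="):
--                 return part[3:]
--     return None
-- ===== SOURCE B (Python) =====
-- def _cn_from_dn(dn: str) -> str | None:
--     """Parse CN from a DN by building a first-wins attribute table, then looking up CN."""
--     sep = "/" if dn.startswith("/") else ","
--     attrs = {}
--     for part in dn.split(sep):
--         part = part.strip()
--         i = part.find("=")
--         if i < 0:
--             continue
--         attrs.setdefault(part[:i].upper(), part[i + 1:])
--     return attrs.get("CN")
-- ===== Notes on version B (the rewrite author's own statement) =====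
-- stated objective: alternative
-- what changed: B replaces A's scan-and-return-early over DN parts by building a first-wins attribute table (dict keyed by the upper-cased text before the first '=') in one pass and then looking up 'CN'.
import Mathlib
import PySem

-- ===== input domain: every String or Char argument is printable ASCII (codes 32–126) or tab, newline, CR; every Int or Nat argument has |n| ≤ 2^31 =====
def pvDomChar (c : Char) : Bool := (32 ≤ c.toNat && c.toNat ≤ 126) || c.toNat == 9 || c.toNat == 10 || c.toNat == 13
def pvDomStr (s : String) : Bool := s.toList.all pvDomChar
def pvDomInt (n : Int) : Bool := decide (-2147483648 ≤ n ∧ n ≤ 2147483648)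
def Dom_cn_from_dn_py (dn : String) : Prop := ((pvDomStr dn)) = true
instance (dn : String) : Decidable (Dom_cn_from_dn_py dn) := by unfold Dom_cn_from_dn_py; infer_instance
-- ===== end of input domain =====

-- B builds a first-wins attribute table (dict keyed by the upper-cased text before '=') and looks
-- up "CN", instead of A's scan-and-return-early over the DN parts; objective: alternative.


-- ===== PORT A =====
-- A's loop: `for part in dn.split(sep): part = part.strip(); if part.upper().startswith("CN="): return part[3:]`
def cnLoopA : List (List Char) → Option (List Char)
  | [] => none
  | p :: rest =>
    let part := PySem.Chars.strip p
    if PySem.Chars.startswith (PySem.Chars.upper part) ['C', 'N', '='] then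
      some (PySem.Chars.slice part (some 3) none)
    else cnLoopA rest

def cn_from_dn_py (dn : String) : Option String :=
  if dn.toList = [] then none
  else if PySem.Chars.startswith dn.toList ['/'] then
    (cnLoopA (PySem.Chars.splitOn dn.toList ['/'])).map String.mk
  else
    (cnLoopA (PySem.Chars.splitOn dn.toList [','])).map String.mk

-- ===== PORT B =====
-- B's loop body: `i = part.find("="); if i < 0: continue; attrs.setdefault(part[:i].upper(), part[i+1:])`
def cnStepB (d : PySem.Dict (List Char) (List Char)) (p : List Char) :
    PySem.Dict (List Char) (List Char) :=
  let part := PySem.Chars.strip p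
  let i := PySem.Chars.find part ['=']
  if i < 0 then d
  else
    d.setdefault (PySem.Chars.upper (PySem.Chars.slice part none (some i)))
      (PySem.Chars.slice part (some (i + 1)) none)

def cn_from_dn_py_alt (dn : String) : Option String :=
  let sep : List Char := if PySem.Chars.startswith dn.toList ['/'] then ['/'] else [',']
  let attrs := (PySem.Chars.splitOn dn.toList sep).foldl cnStepB PySem.Dict.empty
  (attrs.get? ['C', 'N']).map String.mk

-- ===== PRECONDITION & SPEC =====
def Spec_cn_from_dn_py (dn : String) (out : Option String) : Prop := out = cn_from_dn_py_alt dn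
instance (dn : String) (out : Option String) : Decidable (Spec_cn_from_dn_py dn out) := by unfold Spec_cn_from_dn_py; infer_instance

-- ===== CLAIM (what is proved, stated in full; the proofs are below) =====
def Claim_equal_cn_from_dn_py : Prop := ∀ (dn : String), Dom_cn_from_dn_py dn → Spec_cn_from_dn_py dn (cn_from_dn_py dn)

-- ===== LEMMAS AND PROOFS =====

-- upperChar only moves lowercase ASCII letters, so only '=' upper-cases to '='.
theorem pv_upperChar_eq_eq {c : Char} (h : PySem.Chars.upperChar c = '=') : c = '=' := by
  by_cases hl : PySem.Chars.islower c = true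
  · exfalso
    have hb : 97 ≤ c.toNat ∧ c.toNat ≤ 122 := by
      simpa [PySem.Chars.islower, Char.le_def, UInt32.le_iff_toNat_le] using hl
    rw [PySem.Chars.upperChar, if_pos hl] at h
    have h1 := congrArg Char.toNat h
    rw [Char.toNat_ofNat, if_pos (Or.inl (by omega))] at h1
    have : ('=' : Char).toNat = 61 := by decide
    omega
  · rw [PySem.Chars.upperChar, if_neg hl] at h; exact h

-- A's test `part.upper().startswith("CN=")` characterised by the shape of the part.
theorem pv_startswith_CN_iff (s : List Char) :
    PySem.Chars.startswith (PySem.Chars.upper s) ['C', 'N', '='] = true ↔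
      ∃ a b t, s = a :: b :: '=' :: t ∧
        PySem.Chars.upperChar a = 'C' ∧ PySem.Chars.upperChar b = 'N' := by
  constructor
  · intro h
    match s with
    | [] => simp [PySem.Chars.startswith, PySem.Chars.upper] at h
    | [a] => simp [PySem.Chars.startswith, PySem.Chars.upper] at h
    | [a, b] => simp [PySem.Chars.startswith, PySem.Chars.upper] at h
    | a :: b :: c :: t =>
      simp [PySem.Chars.startswith, PySem.Chars.upper] at h
      obtain ⟨h1, h2, h3⟩ := h
      exact ⟨a, b, t, by rw [pv_upperChar_eq_eq h3.symm], h1.symm, h2.symm⟩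
  · rintro ⟨a, b, t, rfl, h1, h2⟩
    simp [PySem.Chars.startswith, PySem.Chars.upper, h1, h2]
    decide

-- `part.find("=")`: either '=' is absent, or it reports the first occurrence.
theorem pv_find_go_spec : ∀ (s : List Char) (k : Nat),
    ('=' ∉ s ∧ PySem.Chars.find.go ['='] s k = -1) ∨
      ∃ pre post, s = pre ++ '=' :: post ∧ '=' ∉ pre ∧
        PySem.Chars.find.go ['='] s k = (k : Int) + pre.length
  | [], k => Or.inl ⟨by simp, rfl⟩
  | c :: t, k => by
    have hgo : PySem.Chars.find.go ['='] (c :: t) k =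
        if ['='].isPrefixOf (c :: t) then (k : Int) else PySem.Chars.find.go ['='] t (k + 1) := rfl
    by_cases hc : c = '='
    · subst hc
      refine Or.inr ⟨[], t, rfl, by simp, ?_⟩
      rw [hgo, if_pos (by simp [List.isPrefixOf])]
      simp
    · have hpre : ['='].isPrefixOf (c :: t) = false := by
        simp [List.isPrefixOf, Ne.symm hc]
      rcases pv_find_go_spec t (k + 1) with ⟨hmem, heq⟩ | ⟨pre, post, hs, hp, heq⟩
      · exact Or.inl ⟨by simp [Ne.symm hc, hmem], by rw [hgo, if_neg (by simp [hpre]), heq]⟩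
      · refine Or.inr ⟨c :: pre, post, by rw [hs]; simp, by simp [Ne.symm hc, hp], ?_⟩
        rw [hgo, if_neg (by simp [hpre]), heq]
        simp
        ring

theorem pv_find_spec (s : List Char) :
    ('=' ∉ s ∧ PySem.Chars.find s ['='] = -1) ∨
      ∃ pre post, s = pre ++ '=' :: post ∧ '=' ∉ pre ∧
        PySem.Chars.find s ['='] = (pre.length : Int) := by
  rcases pv_find_go_spec s 0 with ⟨h1, h2⟩ | ⟨pre, post, h1, h2, h3⟩
  · exact Or.inl ⟨h1, h2⟩
  · exact Or.inr ⟨pre, post, h1, h2, by simpa using h3⟩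

-- zeta-reduced form of B's step (proof convenience only).
theorem cnStepB_eq (d : PySem.Dict (List Char) (List Char)) (p : List Char) :
    cnStepB d p =
      if PySem.Chars.find (PySem.Chars.strip p) ['='] < 0 then d
      else
        d.setdefault
          (PySem.Chars.upper (PySem.Chars.slice (PySem.Chars.strip p) none
            (some (PySem.Chars.find (PySem.Chars.strip p) ['=']))))
          (PySem.Chars.slice (PySem.Chars.strip p)
            (some (PySem.Chars.find (PySem.Chars.strip p) ['='] + 1)) none) := rfl

-- if a first-'=' decomposition matches a "CN=" head shape, they coincide.
theorem pv_first_split (pre post : List Char) (a b : Char) (t : List Char)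
    (h : pre ++ '=' :: post = a :: b :: '=' :: t) (hp : '=' ∉ pre)
    (h1 : PySem.Chars.upperChar a = 'C') (h2 : PySem.Chars.upperChar b = 'N') :
    pre = [a, b] ∧ post = t := by
  cases pre with
  | nil =>
    exfalso
    have ha : '=' = a := by simpa using (List.cons_eq_cons.mp (by simpa using h)).1
    rw [← ha] at h1; exact absurd h1 (by decide)
  | cons x pre1 =>
    cases pre1 with
    | nil =>
      exfalso
      simp only [List.cons_append, List.nil_append, List.cons_eq_cons] at h
      rw [← h.2.1] at h2; exact absurd h2 (by decide)
    | cons y pre2 =>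
      cases pre2 with
      | nil => simp_all
      | cons z pre3 =>
        exfalso
        simp only [List.cons_append, List.cons_eq_cons] at h
        obtain ⟨hx, hy, hz, _⟩ := h
        subst hz
        exact hp (by simp)

theorem pv_upper_eq_CN (pre : List Char) (h : PySem.Chars.upper pre = ['C', 'N']) :
    ∃ a b, pre = [a, b] ∧ PySem.Chars.upperChar a = 'C' ∧ PySem.Chars.upperChar b = 'N' := by
  cases pre with
  | nil => simp [PySem.Chars.upper] at h
  | cons a pre1 =>
    cases pre1 with
    | nil => simp [PySem.Chars.upper] at h
    | cons b pre2 =>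
      cases pre2 with
      | nil =>
        simp only [PySem.Chars.upper, List.map] at h
        exact ⟨a, b, rfl, by simp_all, by simp_all⟩
      | cons c pre3 => simp [PySem.Chars.upper] at h

-- What one step of B's table-building loop does to the "CN" entry.
theorem pv_step_get_CN (d : PySem.Dict (List Char) (List Char)) (p : List Char) :
    (cnStepB d p).get? ['C', 'N'] =
      if PySem.Chars.startswith (PySem.Chars.upper (PySem.Chars.strip p)) ['C', 'N', '='] then
        some ((d.get? ['C', 'N']).getD (PySem.Chars.slice (PySem.Chars.strip p) (some 3) none))
      else d.get? ['C', 'N'] := by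
  rcases pv_find_spec (PySem.Chars.strip p) with ⟨hmem, hfind⟩ | ⟨pre, post, hs, hp, hfind⟩
  · have htest : ¬ PySem.Chars.startswith (PySem.Chars.upper (PySem.Chars.strip p)) ['C', 'N', '='] = true := by
      intro h
      rcases (pv_startswith_CN_iff _).1 h with ⟨a, b, t, he, _, _⟩
      exact hmem (by rw [he]; simp)
    rw [if_neg htest]
    rw [cnStepB_eq, hfind]
    norm_num
  · rw [cnStepB_eq, hfind, if_neg (by omega)]
    have hkey : PySem.Chars.slice (PySem.Chars.strip p) none (some (pre.length : Int)) = pre := by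
      show PySem.List.slice _ none (some _) = pre
      rw [PySem.List.slice_to _ (by omega), hs, Int.toNat_natCast, List.take_left]
    have hval : PySem.Chars.slice (PySem.Chars.strip p) (some ((pre.length : Int) + 1)) none = post := by
      show PySem.List.slice _ (some _) none = post
      rw [PySem.List.slice_from _ (by omega)]
      have h1 : ((pre.length : Int) + 1).toNat = pre.length + 1 := by omega
      rw [h1, hs, show pre ++ '=' :: post = (pre ++ ['=']) ++ post by simp,
        List.drop_left' (by simp)]
    rw [hkey, hval]
    by_cases htest : PySem.Chars.startswith (PySem.Chars.upper (PySem.Chars.strip p)) ['C', 'N', '='] = true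
    · rcases (pv_startswith_CN_iff _).1 htest with ⟨a, b, t, he, h1, h2⟩
      have hs' : pre ++ '=' :: post = a :: b :: '=' :: t := hs.symm.trans he
      have hab : pre = [a, b] ∧ post = t := pv_first_split pre post a b t hs' hp h1 h2
      obtain ⟨hpre2, hpost2⟩ := hab
      subst hpre2; subst hpost2
      have hkeyCN : PySem.Chars.upper [a, b] = ['C', 'N'] := by
        simp [PySem.Chars.upper, h1, h2]
      rw [hkeyCN, if_pos htest, PySem.Dict.get?_setdefault_self]
      have hsl : PySem.Chars.slice (PySem.Chars.strip p) (some 3) none = post := by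
        show PySem.List.slice _ (some _) none = post
        rw [PySem.List.slice_from _ (by omega), he]
        rfl
      rw [hsl]
    · rw [if_neg htest]
      have hne : ¬ (['C', 'N'] = PySem.Chars.upper pre) := by
        intro hup
        obtain ⟨a, b, hpre2, h1, h2⟩ := pv_upper_eq_CN pre hup.symm
        subst hpre2
        exact htest ((pv_startswith_CN_iff _).2 ⟨a, b, post, by simpa using hs, h1, h2⟩)
      exact PySem.Dict.get?_setdefault_of_ne _ _ hne

-- B's whole fold, observed at key "CN", is A's first-match scan (unless the table already has CN).
theorem pv_fold_get_CN (parts : List (List Char)) :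
    ∀ d : PySem.Dict (List Char) (List Char),
      (parts.foldl cnStepB d).get? ['C', 'N'] =
        match d.get? ['C', 'N'] with
        | some v => some v
        | none => cnLoopA parts := by
  induction parts with
  | nil => intro d; cases hd : d.get? ['C', 'N'] <;> simp [hd, cnLoopA]
  | cons p rest ih =>
    intro d
    rw [List.foldl_cons, ih, pv_step_get_CN]
    by_cases htest : PySem.Chars.startswith (PySem.Chars.upper (PySem.Chars.strip p)) ['C', 'N', '='] = true
    · rw [if_pos htest]
      cases hd : d.get? ['C', 'N'] <;> simp [cnLoopA, htest]
    · rw [if_neg htest]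
      cases hd : d.get? ['C', 'N'] <;> simp [cnLoopA, htest]

-- ===== VERDICT (by name: the statement is the Claim_ definition above) =====
theorem cn_from_dn_py_spec : Claim_equal_cn_from_dn_py := by
  intro dn _
  unfold Spec_cn_from_dn_py cn_from_dn_py cn_from_dn_py_alt
  by_cases h0 : dn.toList = []
  · rw [h0]; decide
  · rw [if_neg h0]
    by_cases hs : PySem.Chars.startswith dn.toList ['/'] = true
    · rw [if_pos hs, if_pos hs]
      simp only [pv_fold_get_CN]
      simp [pysem]
    · rw [if_neg hs, if_neg hs]
      simp only [pv_fold_get_CN]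
      simp [pysem]
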